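-- pv_equiv track=rewrite | github.com/PyMamba/mamba-framework | mamba/application/model.py | _generate_format_lists
-- ===== SOURCE A (Python) =====
-- def _generate_format_lists(fields, exclude):
--     if not fields and not exclude:
--         return [], {}, [], {}
--
--     fk_fields, fk_exclude = {}, {}
--
--     for name in fields:
--         if name.find('.') != -1:
--             key, value = name.split('.')
--             if key not in fields:
--                 fields.append(key)
--             if key in fk_fields:
--                 fk_fields[key].append(value)
--             else:
--                 fk_fields[key] = [value]
--
--     for name in exclude:
--         if name.find('.') != -1:
--             key, value = name.split('.')
--             if key in fk_exclude:
--                 fk_exclude[key].append(value)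
--             else:
--                 # if key not in exclude:
--                     # fields.append(key)
--                 fk_exclude[key] = [value]
--
--     return fields, fk_fields, exclude, fk_exclude
-- ===== SOURCE B (Python) =====
-- def _generate_format_lists(fields, exclude):
--     if not fields and not exclude:
--         return [], {}, [], {}
--
--     def group(names):
--         pairs = [name.split('.') for name in names if name.find('.') != -1]
--         seen = dict.fromkeys(key for key, value in pairs)
--         return {key: [v for k, v in pairs if k == key] for key in seen}
--
--     fk_fields = group(fields)
--     missing = [key for key in fk_fields if key not in fields]
--     fields.extend(missing)
--
--     fk_exclude = group(exclude)
--
--     return fields, fk_fields, exclude, fk_exclude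
-- ===== Notes on version B (the rewrite author's own statement) =====
-- stated objective: alternative
-- what changed: B builds no dict incrementally: it materialises the list of (key, value) split pairs, dedups the keys with dict.fromkeys, and constructs each fk dict entry by a per-key gather scan over the pairs (a dict comprehension), then extends fields in one shot with the grouped keys missing from it, instead of A's single loop that splits, appends to fields and updates the dict entry-by-entry while iterating over the list it is mutating.
import Mathlib
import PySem

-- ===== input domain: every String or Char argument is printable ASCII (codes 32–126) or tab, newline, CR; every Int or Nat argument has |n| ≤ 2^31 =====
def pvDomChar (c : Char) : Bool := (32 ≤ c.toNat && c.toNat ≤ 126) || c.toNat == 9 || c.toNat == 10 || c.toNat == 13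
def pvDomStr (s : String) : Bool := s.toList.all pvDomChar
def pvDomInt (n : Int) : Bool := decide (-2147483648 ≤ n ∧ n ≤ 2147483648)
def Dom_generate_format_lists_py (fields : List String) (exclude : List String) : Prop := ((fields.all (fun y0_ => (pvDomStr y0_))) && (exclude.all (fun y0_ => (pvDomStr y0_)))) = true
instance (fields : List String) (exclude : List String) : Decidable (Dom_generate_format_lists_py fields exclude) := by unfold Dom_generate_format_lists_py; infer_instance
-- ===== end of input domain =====

-- B replaces A's incremental mutate-while-iterating grouping with a gather: it materialises the
-- (key, value) split pairs, dedups the keys, and builds each dict entry by a per-key scan of the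
-- pairs; fields is then extended in one shot with the keys missing from it. Same returned tuple.
-- Both A and B mutate the `fields` argument in place (appending fk keys); the equivalence proved
-- here is about the returned tuple (whose first component is that same mutated list in both).


-- ===== PORT A =====

-- name.find('.') != -1
def pvDotted (name : String) : Bool := PySem.Str.find name "." != -1

-- key, value = name.split('.')  (none exactly where Python's 2-target unpack raises ValueError)
def pvSplitKV (name : String) : Option (String × String) :=
  match PySem.Str.split? name "." with
  | some [k, v] => some (k, v)
  | _ => none

-- A's dict update: if key in fk: fk[key].append(value) else: fk[key] = [value]
def pvDictAddA (fk : PySem.Dict String (List String)) (k v : String) : PySem.Dict String (List String) :=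
  if fk.contains k then fk.modify k [] (fun vs => vs ++ [v]) else fk.insert k [v]

-- splitOn pieces contain no '.' (needed for pvLoopA's termination: appended keys are dot-free)
theorem pvSplitKV_go_dotfree : ∀ (fuel : Nat) (l cur : List Char) (acc : List (List Char)),
    l.length ≤ fuel → ('.' ∉ cur) → (∀ p ∈ acc, '.' ∉ p) →
    ∀ p ∈ PySem.Chars.splitOn.go ['.'] fuel l cur acc, '.' ∉ p := by
  intro fuel
  induction fuel with
  | zero =>
    intro l cur acc hl hcur hacc p hp
    rw [PySem.Chars.splitOn.go] at hp
    simp at hl; subst hl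
    simp at hp
    rcases hp with h | h
    · exact hacc p h
    · subst h; simpa using hcur
  | succ n ih =>
    intro l cur acc hl hcur hacc p hp
    match l with
    | [] =>
      rw [PySem.Chars.splitOn.go.eq_2 _ _ _ _ (by omega)] at hp
      simp at hp
      rcases hp with h | h
      · exact hacc p h
      · subst h; simpa using hcur
    | c :: rest =>
      rw [PySem.Chars.splitOn.go] at hp
      by_cases hpre : List.isPrefixOf ['.'] (c :: rest)
      · simp only [hpre, if_true] at hp
        simp [List.isPrefixOf] at hpre
        refine ih rest [] _ (by simpa using hl) (by simp) ?_ p hp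
        intro q hq
        simp at hq
        rcases hq with h | h
        · subst h; simpa using hcur
        · exact hacc q h
      · simp only [hpre] at hp
        have hc : c ≠ '.' := by
          simp [List.isPrefixOf] at hpre
          exact fun h => hpre h.symm
        refine ih rest (c :: cur) acc (by simpa using Nat.le_of_succ_le_succ hl) ?_ hacc p hp
        simp [hcur]
        exact fun h => hc h.symm

theorem pvSplitKV_key_not_dotted {name k v : String} (h : pvSplitKV name = some (k, v)) :
    pvDotted k = false := by
  unfold pvSplitKV at h
  rw [PySem.Str.split?.eq_1] at h
  simp only [PySem.Chars.split?] at h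
  rcases hsp : PySem.Chars.splitOn name.toList ".".toList with _ | ⟨kl, _ | ⟨vl, _ | _⟩⟩ <;>
    rw [hsp] at h <;> simp at h
  have hmem : kl ∈ PySem.Chars.splitOn name.toList ['.'] := by
    have : ".".toList = ['.'] := rfl
    rw [this] at hsp; rw [hsp]; simp
  have hdot : '.' ∉ kl := by
    refine pvSplitKV_go_dotfree (name.toList.length + 1) name.toList [] [] (by omega)
      (by simp) (by simp) kl ?_
    rw [PySem.Chars.splitOn] at hmem
    exact hmem
  rw [← h.1]
  simp [pvDotted, PySem.Chars.find_eq_neg_one_iff, List.singleton_infix_iff]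
  simpa using hdot

theorem pvMeasure_lt {done : List String} {name k v : String} {rest : List String}
    (hd : pvDotted name = true) (hsp : pvSplitKV name = some (k, v)) :
    2 * List.countP pvDotted (if (done ++ name :: rest).contains k then rest else rest ++ [k]) +
      (if (done ++ name :: rest).contains k then rest else rest ++ [k]).length <
      2 * List.countP pvDotted (name :: rest) + (name :: rest).length := by
  have hk := pvSplitKV_key_not_dotted hsp
  split <;> simp [List.countP_append, hd, hk] <;> omega

-- A's first loop: for name in fields (fields is mutated under the iteration; `done` is the part
-- already iterated, `todo` the part still to come — appends go to the end of `todo`)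
def pvLoopA (done todo : List String) (fk : PySem.Dict String (List String)) :
    List String × PySem.Dict String (List String) :=
  match todo with
  | [] => (done, fk)
  | name :: rest =>
    if hd : pvDotted name then
      match hsp : pvSplitKV name with
      | some (k, v) =>
        pvLoopA (done ++ [name])
          (if (done ++ name :: rest).contains k then rest else rest ++ [k])
          (pvDictAddA fk k v)
      | none => pvLoopA (done ++ [name]) rest fk  -- Python raises ValueError here (outside Pre_)
    else pvLoopA (done ++ [name]) rest fk
  termination_by 2 * todo.countP pvDotted + todo.length
  decreasing_by
  · exact pvMeasure_lt hd hsp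
  · simp [hd]; omega
  · simp [hd]

-- A's second loop over exclude (no list mutation)
def pvLoopAEx (exclude : List String) : PySem.Dict String (List String) :=
  exclude.foldl
    (fun fk name =>
      if pvDotted name then
        match pvSplitKV name with
        | some (k, v) => pvDictAddA fk k v
        | none => fk  -- Python raises ValueError here (outside Pre_)
      else fk)
    PySem.Dict.empty

def generate_format_lists_py (fields : List String) (exclude : List String) :
    List String × (List (String × List String)) × List String × (List (String × List String)) :=
  if fields.isEmpty && exclude.isEmpty then ([], [], [], [])
  else
    let r := pvLoopA [] fields PySem.Dict.empty
    (r.1, r.2.items, exclude, (pvLoopAEx exclude).items)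

-- ===== PORT B =====

-- pairs = [name.split('.') for name in names if name.find('.') != -1]
-- (a >2-piece split is kept by the Python list but raises ValueError at the later 2-target
-- unpack `for key, value in pairs`; those inputs are outside Pre_, so the port drops them)
def pvPairsB (names : List String) : List (String × String) :=
  names.filterMap (fun n => if pvDotted n then pvSplitKV n else none)

-- seen = dict.fromkeys(key for key, value in pairs);  {key: [v for k, v in pairs if k == key] for key in seen}
def pvGroupB (names : List String) : PySem.Dict String (List String) :=
  let pairs := pvPairsB names
  let seen := PySem.List.dedup (pairs.map Prod.fst)
  seen.foldl (fun d key => d.insert key ((pairs.filter (fun p => p.1 == key)).map Prod.snd))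
    PySem.Dict.empty

def generate_format_lists_py_alt (fields : List String) (exclude : List String) :
    List String × (List (String × List String)) × List String × (List (String × List String)) :=
  if fields.isEmpty && exclude.isEmpty then ([], [], [], [])
  else
    let fkFields := pvGroupB fields
    let missing := fkFields.keys.filter (fun key => !fields.contains key)
    (fields ++ missing, fkFields.items, exclude, (pvGroupB exclude).items)

-- ===== PRECONDITION & SPEC =====

-- Pre_ excludes exactly the inputs where a name contains more than one '.', on which Python's
-- two-target unpack `key, value = name.split('.')` raises ValueError in both A and B.
def Pre_generate_format_lists_py (fields : List String) (exclude : List String) : Prop :=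
  (∀ s ∈ fields, PySem.Str.find s "." ≠ -1 → ((PySem.Str.split? s ".").getD []).length = 2) ∧
  (∀ s ∈ exclude, PySem.Str.find s "." ≠ -1 → ((PySem.Str.split? s ".").getD []).length = 2)
instance (fields : List String) (exclude : List String) : Decidable (Pre_generate_format_lists_py fields exclude) := by unfold Pre_generate_format_lists_py; infer_instance

def pvWitness_generate_format_lists_py : List String × List String :=
  (["a.b", "c", "a.d"], ["c.x", "e"])

def Spec_generate_format_lists_py (fields : List String) (exclude : List String) (out : List String × (List (String × List String)) × List String × (List (String × List String))) : Prop := out = generate_format_lists_py_alt fields exclude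
instance (fields : List String) (exclude : List String) (out : List String × (List (String × List String)) × List String × (List (String × List String))) : Decidable (Spec_generate_format_lists_py fields exclude out) := by unfold Spec_generate_format_lists_py; infer_instance

-- ===== CLAIM (what is proved, stated in full; the proofs are below) =====
def Claim_equal_generate_format_lists_py : Prop := ∀ (fields : List String) (exclude : List String), Dom_generate_format_lists_py fields exclude → Pre_generate_format_lists_py fields exclude → Spec_generate_format_lists_py fields exclude (generate_format_lists_py fields exclude)

-- ===== LEMMAS AND PROOFS =====

-- the keys of the dotted names of a list, in encounter order (with multiplicity)
def pvDotKeys (names : List String) : List String :=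
  names.filterMap (fun n => if pvDotted n then (pvSplitKV n).map Prod.fst else none)

-- the dict step both of A's loops perform
def pvStepA (fk : PySem.Dict String (List String)) (name : String) : PySem.Dict String (List String) :=
  if pvDotted name then
    match pvSplitKV name with
    | some (k, v) => pvDictAddA fk k v
    | none => fk
  else fk

theorem pvDotKeys_append_undotted {names : List String} {k : String} (h : pvDotted k = false) :
    pvDotKeys (names ++ [k]) = pvDotKeys names := by
  simp [pvDotKeys, h]

theorem pvFoldl_stepA_append_undotted {names : List String} {k : String}
    (h : pvDotted k = false) (fk : PySem.Dict String (List String)) :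
    (names ++ [k]).foldl pvStepA fk = names.foldl pvStepA fk := by
  simp [List.foldl_append, pvStepA, h]

-- A's loop = Set.update of the current list with the dotted keys, plus the plain dict fold
theorem pvLoopA_eq : ∀ (done todo : List String) (fk : PySem.Dict String (List String)),
    pvLoopA done todo fk =
      (PySem.Set.update (done ++ todo) (pvDotKeys todo), todo.foldl pvStepA fk) := by
  intro done todo fk
  fun_induction pvLoopA done todo fk with
  | case1 done fk => simp [pvDotKeys, PySem.Set.update]
  | case2 done fk name rest hd k v hsp ih =>
    have hk := pvSplitKV_key_not_dotted hsp
    have hdk : pvDotKeys (name :: rest) = k :: pvDotKeys rest := by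
      simp [pvDotKeys, hd, hsp]
    have hstep : pvStepA fk name = pvDictAddA fk k v := by
      simp [pvStepA, hd, hsp]
    by_cases hc : (done ++ name :: rest).contains k
    · rw [if_pos hc]
      rw [dif_pos hc] at ih
      rw [ih]
      have hmem : k ∈ done ++ name :: rest := by simpa using hc
      simp only [Prod.mk.injEq]
      refine ⟨?_, ?_⟩
      · rw [hdk, PySem.Set.update_cons, PySem.Set.add_of_mem (by simpa using hmem)]
        simp
      · simp [hstep]
    · rw [if_neg hc]
      rw [dif_neg hc] at ih
      rw [ih]
      have hmem : k ∉ done ++ name :: rest := by simpa using hc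
      simp only [Prod.mk.injEq]
      refine ⟨?_, ?_⟩
      · rw [hdk, PySem.Set.update_cons, PySem.Set.add_of_not_mem (by simpa using hmem),
          pvDotKeys_append_undotted hk]
        simp
      · rw [pvFoldl_stepA_append_undotted hk]
        simp [hstep]
  | case3 done fk name rest hd hsp ih =>
    rw [ih]
    have hdk : pvDotKeys (name :: rest) = pvDotKeys rest := by
      simp [pvDotKeys, hd, hsp]
    have hstep : pvStepA fk name = fk := by simp [pvStepA, hd, hsp]
    simp [hdk, hstep]
  | case4 done fk name rest hd ih =>
    rw [ih]
    have hdk : pvDotKeys (name :: rest) = pvDotKeys rest := by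
      simp [pvDotKeys, hd]
    have hstep : pvStepA fk name = fk := by simp [pvStepA, hd]
    simp [hdk, hstep]

-- A's conditional dict step IS a plain modify (modify inserts f [] for a missing key)
theorem pvDictAddA_eq_modify (fk : PySem.Dict String (List String)) (k v : String) :
    pvDictAddA fk k v = fk.modify k [] (fun vs => vs ++ [v]) := by
  unfold pvDictAddA
  by_cases hc : fk.contains k
  · rw [if_pos hc]
  · rw [if_neg hc]
    simp at hc
    simp [PySem.Dict.modify, PySem.Dict.getD_of_not_contains _ _ hc]

-- a fold over a filterMap is the fold that skips the nones
theorem pvFoldl_filterMap {α β γ : Type} (l : List α) (f : α → Option β) (g : γ → β → γ) (d : γ) :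
    (l.filterMap f).foldl g d = l.foldl (fun x a => match f a with | some b => g x b | none => x) d := by
  induction l generalizing d with
  | nil => rfl
  | cons a t ih => cases h : f a <;> simp [h, ih]

-- A's dict fold = the modify-fold over B's pair list
theorem pvFoldl_stepA_eq_pairs (names : List String) (d : PySem.Dict String (List String)) :
    names.foldl pvStepA d =
      (pvPairsB names).foldl (fun d p => d.modify p.1 [] (fun vs => vs ++ [p.2])) d := by
  rw [pvPairsB, pvFoldl_filterMap]
  apply PySem.List.foldl_congr_mem
  intro fk name _
  unfold pvStepA
  by_cases hd : pvDotted name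
  · rcases hsp : pvSplitKV name with _ | ⟨k, v⟩ <;> simp [hd, hsp, pvDictAddA_eq_modify]
  · simp [hd]

-- pairs.map fst = the dotted-key trace pvDotKeys
theorem pvPairsB_map_fst (names : List String) :
    (pvPairsB names).map Prod.fst = pvDotKeys names := by
  simp [pvPairsB, pvDotKeys, List.map_filterMap]
  congr 1
  funext n
  by_cases hd : pvDotted n <;> simp [hd]

-- A's dict equals B's gathered dict
theorem pvStepA_fold_eq_groupB (names : List String) :
    names.foldl pvStepA PySem.Dict.empty = pvGroupB names := by
  rw [pvFoldl_stepA_eq_pairs]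
  apply PySem.Dict.ext
  have hnd : ((pvPairsB names).foldl (fun d p => d.modify p.1 [] (fun vs => vs ++ [p.2]))
      PySem.Dict.empty).keys.Nodup := by
    exact PySem.Dict.nodup_keys_foldl_modify_key _ _ _ _ _ PySem.Dict.nodup_keys_empty
  rw [PySem.Dict.items_eq_map_keys _ hnd ([] : List String)]
  have hkeys : ((pvPairsB names).foldl (fun d p => d.modify p.1 [] (fun vs => vs ++ [p.2]))
      PySem.Dict.empty).keys = PySem.Set.ofList ((pvPairsB names).map Prod.fst) := by
    rw [PySem.Dict.keys_foldl_modify_key]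
    simp [PySem.Set.update_nil_left]
  rw [hkeys]
  unfold pvGroupB
  rw [PySem.Dict.items_foldl_insert_fresh _ _ _ _ (by simp) (by simpa using PySem.Set.nodup_ofList _)]
  simp only [PySem.List.dedup_eq_ofList, PySem.Dict.items, PySem.Dict.empty, List.nil_append]
  apply List.map_congr_left
  intro k _
  rw [PySem.Dict.getD_foldl_modify_append]
  simp [PySem.Dict.getD, PySem.Dict.get?]

-- ===== VERDICT (by name: the statement is the Claim_ definition above) =====
theorem generate_format_lists_py_spec : Claim_equal_generate_format_lists_py := by
  intro fields exclude _hdom _hpre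
  unfold Spec_generate_format_lists_py
  unfold generate_format_lists_py generate_format_lists_py_alt
  by_cases hg : fields.isEmpty && exclude.isEmpty
  · simp [hg]
  · simp only [hg, if_false, Bool.false_eq_true]
    rw [pvLoopA_eq]
    have h1 : pvLoopAEx exclude = exclude.foldl pvStepA PySem.Dict.empty := rfl
    rw [h1, pvStepA_fold_eq_groupB, pvStepA_fold_eq_groupB]
    have hkeysB : (pvGroupB fields).keys = PySem.Set.ofList (pvDotKeys fields) := by
      rw [← pvStepA_fold_eq_groupB, pvFoldl_stepA_eq_pairs, PySem.Dict.keys_foldl_modify_key,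
        pvPairsB_map_fst]
      simp [PySem.Set.update_nil_left]
    simp only [hkeysB, List.nil_append]
    rw [PySem.Set.update_eq_append_filter]
    simp
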